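-- pv_equiv track=rewrite | github.com/matteoprata/NLP-W2V-Embeddings | data_preprocessing.py | generate_batch_dynamic
-- ===== SOURCE A (Python) =====
-- def generate_batch_dynamic(batch_size, data_start, window_start, window_size, data):
--     """
--     It generates training data and relative labels from the dataset. The train data and label data have size
--     batch_size and they are dynamically generated from data[data_start] and from the index window_start of its window.
--     :param batch_size: Integer - the size of this batch
--     :param data_start: Integer - the index in data where to start generating the batch
--     :param window_start: Integer - the index in window of data[data_start] where to start generating the batch
--     :param window_size: Integer - the size of the window
--     :param data: [String] - the list of words in the dataset
--
--     :return: ([String], [String], (Integer, Integer)) - the train data and the labeled data, a couple of integer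
--     representing the point where to start generating the batches next time
--     """
--
--     train_data = []
--     labels = []
--
--     for iwd in range(data_start, len(data)):
--         # The list represents the window of item data[iwd] of size at most 2*window_size, item data[iwd] is excluded
--         wind = data[max(iwd - window_size, 0): iwd] + data[iwd + 1: min(iwd + window_size, len(data)) + 1]
--
--         # Put each element of the window in labels, put the corresponding data[iwd] in train_data.
--         # Start from window_start avoid element generator of the window
--         for el in wind[window_start:]:
--
--             # If train_data and labels have space fill them, else return them, further indices of data and window
--             if len(train_data) < batch_size:
--                 train_data.append(data[iwd])
--                 labels.append(el)
--                 window_start += 1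
--             else:
--                 return train_data, labels, (data_start, window_start)
--         data_start += 1
--         window_start = 0
--     return train_data, labels, (data_start, window_start)
-- ===== SOURCE B (Python) =====
-- def generate_batch_dynamic(batch_size, data_start, window_start, window_size, data):
--     # Two staged passes instead of one streaming sweep: (1) a pure-arithmetic
--     # counting pass (no window is materialised) locates the first un-taken pair
--     # (center index, window offset); (2) a build pass assembles train/labels by
--     # window slicing and repetition up to that point.
--     n = len(data)
--     if data_start >= n:
--         return [], [], (data_start, window_start)
--
--     def clamp(L, k):  # Python slice-bound clamp for a list of length L
--         return min(k, L) if k >= 0 else max(L + k, 0)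
--
--     def slen(L, a, b):  # len(xs[a:b]) for a list of length L
--         return max(clamp(L, b) - clamp(L, a), 0)
--
--     def wlen(i):  # window length of center i
--         return slen(n, max(i - window_size, 0), i) + slen(n, i + 1, min(i + window_size, n) + 1)
--
--     # Pass 1: counting only.
--     stop = None
--     taken = 0
--     for i in range(data_start, n):
--         off = window_start if i == data_start else 0
--         L = wlen(i)
--         m = L - clamp(L, off)  # len of window(i)[off:]
--         r = max(batch_size - taken, 0)
--         if m > r:
--             stop = (i, off + r)
--             break
--         taken += m
--
--     # Pass 2: build by slicing.
--     last = stop[0] if stop is not None else n - 1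
--     train, labels = [], []
--     for i in range(data_start, last + 1):
--         off = window_start if i == data_start else 0
--         wind = data[max(i - window_size, 0): i] + data[i + 1: min(i + window_size, n) + 1]
--         seg = wind[off:]
--         if stop is not None and i == stop[0]:
--             seg = seg[: stop[1] - off]
--         if seg:
--             train += [data[i]] * len(seg)
--             labels += seg
--     return train, labels, (stop if stop is not None else (n, 0))
-- ===== Notes on version B (the rewrite author's own statement) =====
-- stated objective: alternative
-- what changed: A's single streaming sweep (nested loops mutating train/labels/window_start with an early return buried inside) is replaced by two staged passes: a pure-arithmetic counting pass that locates the first un-taken (center, offset) pair without materialising any window, then a build pass that assembles train and labels by window slicing and list repetition up to that point.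
import Mathlib
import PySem

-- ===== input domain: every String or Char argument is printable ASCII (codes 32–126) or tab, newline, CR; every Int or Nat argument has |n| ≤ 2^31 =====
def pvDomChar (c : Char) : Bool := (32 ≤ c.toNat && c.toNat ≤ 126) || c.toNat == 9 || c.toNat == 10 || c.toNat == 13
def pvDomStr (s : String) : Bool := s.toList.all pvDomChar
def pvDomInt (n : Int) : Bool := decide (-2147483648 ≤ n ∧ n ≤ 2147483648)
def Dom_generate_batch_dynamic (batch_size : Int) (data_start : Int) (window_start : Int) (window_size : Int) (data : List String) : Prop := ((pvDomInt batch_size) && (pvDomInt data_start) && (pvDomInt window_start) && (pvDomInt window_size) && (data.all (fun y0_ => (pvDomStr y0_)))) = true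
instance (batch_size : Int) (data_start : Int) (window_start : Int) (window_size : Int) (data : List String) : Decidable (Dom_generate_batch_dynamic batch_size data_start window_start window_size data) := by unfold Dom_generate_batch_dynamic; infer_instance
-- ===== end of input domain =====

-- B replaces A's single streaming sweep (nested loops, early return) by two staged
-- passes: an arithmetic counting pass locating the resume point, then a build pass
-- assembling the batch by slicing and repetition (objective: alternative decomposition).

-- ===== PORT A =====
-- the window of data[iwd] (this line of source is shared verbatim by A and B)
def pvWind (window_size : Int) (data : List String) (iwd : Int) : List String :=
  PySem.List.slice data (some (max (iwd - window_size) 0)) (some iwd) ++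
  PySem.List.slice data (some (iwd + 1)) (some (min (iwd + window_size) (data.length : Int) + 1))

-- A's inner 'for el in wind[window_start:]' loop: .inl = early return, .inr = loop done
def pvInnerA (batch_size data_start : Int) (center : String) :
    List String → List String → List String → Int →
    (List String × List String × (Int × Int)) ⊕ (List String × List String)
  | [], train, labels, _ws => .inr (train, labels)
  | el :: rest, train, labels, ws =>
    if (train.length : Int) < batch_size then
      pvInnerA batch_size data_start center rest (train ++ [center]) (labels ++ [el]) (ws + 1)
    else
      .inl (train, labels, (data_start, ws))

-- A's outer 'for iwd in range(data_start, len(data))' loop; fuel = number of remaining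
-- iterations; the Python variable data_start equals the current iwd at each loop entry
def pvOuterA (batch_size window_size : Int) (data : List String) :
    Nat → Int → Int → List String → List String → List String × List String × (Int × Int)
  | 0, ds, ws, train, labels => (train, labels, (ds, ws))
  | n + 1, ds, ws, train, labels =>
    let wind := pvWind window_size data ds
    match pvInnerA batch_size ds ((PySem.List.pyGet? data ds).getD "")
        (PySem.List.slice wind (some ws) none) train labels ws with
    | .inl res => res
    | .inr (train', labels') => pvOuterA batch_size window_size data n (ds + 1) 0 train' labels'

def generate_batch_dynamic (batch_size : Int) (data_start : Int) (window_start : Int) (window_size : Int) (data : List String) : List String × List String × (Int × Int) :=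
  pvOuterA batch_size window_size data (((data.length : Int) - data_start).toNat) data_start window_start [] []

-- ===== PORT B =====
-- Source B's clamp: Python slice-bound clamp for a list of length L
def pvClampB (L k : Int) : Int := if 0 ≤ k then min k L else max (L + k) 0

-- Source B's slen: len(xs[a:b]) for a list of length L
def pvSlenB (L a b : Int) : Int := max (pvClampB L b - pvClampB L a) 0

-- Source B's wlen: window length of center i, pure arithmetic
def pvWlenB (window_size n i : Int) : Int :=
  pvSlenB n (max (i - window_size) 0) i + pvSlenB n (i + 1) (min (i + window_size) n + 1)

-- Source B pass 1: counting only; fuel = remaining centers; returns the first un-taken pair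
def pvCountB (batch_size window_start window_size data_start n : Int) :
    Nat → Int → Int → Option (Int × Int)
  | 0, _, _ => none
  | f + 1, i, taken =>
    let off := if i = data_start then window_start else 0
    let L := pvWlenB window_size n i
    let m := L - pvClampB L off
    let r := max (batch_size - taken) 0
    if r < m then some (i, off + r)
    else pvCountB batch_size window_start window_size data_start n f (i + 1) (taken + m)

-- Source B pass 2: build train/labels by slicing and repetition; fuel = centers to visit
def pvBuildB (window_start window_size data_start : Int) (data : List String)
    (stop : Option (Int × Int)) : Nat → Int → List String × List String
  | 0, _ => ([], [])
  | f + 1, i =>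
    let off := if i = data_start then window_start else 0
    let wind := pvWind window_size data i
    let seg0 := PySem.List.slice wind (some off) none
    let seg := match stop with
      | some s => if i = s.1 then PySem.List.slice seg0 none (some (s.2 - off)) else seg0
      | none => seg0
    let rest := pvBuildB window_start window_size data_start data stop f (i + 1)
    if seg = [] then rest
    else (List.replicate seg.length ((PySem.List.pyGet? data i).getD "") ++ rest.1, seg ++ rest.2)

def generate_batch_dynamic_alt (batch_size : Int) (data_start : Int) (window_start : Int) (window_size : Int) (data : List String) : List String × List String × (Int × Int) :=
  let n : Int := data.length
  if n ≤ data_start then ([], [], (data_start, window_start))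
  else
    let stop := pvCountB batch_size window_start window_size data_start n (n - data_start).toNat data_start 0
    let last := match stop with | some s => s.1 | none => n - 1
    let tl := pvBuildB window_start window_size data_start data stop (last + 1 - data_start).toNat data_start
    (tl.1, tl.2, stop.getD (n, 0))

-- ===== PRECONDITION & SPEC =====
-- Pre_ excludes exactly the inputs on which Python A raises IndexError: batch_size ≥ 1
-- and data_start < -len(data) on nonempty data, with some pre-wrap index carrying a
-- nonempty window — either data_start's own window has elements left past window_start
-- (a slice-shape test), or a deeper index does (a pure arithmetic bound). B raises there too.
def Pre_generate_batch_dynamic (batch_size : Int) (data_start : Int) (window_start : Int) (window_size : Int) (data : List String) : Prop :=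
  ¬ (data ≠ [] ∧ 1 ≤ batch_size ∧ data_start < -(data.length : Int) ∧
      (PySem.List.slice
         (PySem.List.slice data (some (max (data_start - window_size) 0)) (some data_start) ++
          PySem.List.slice data (some (data_start + 1))
            (some (min (data_start + window_size) (data.length : Int) + 1)))
         (some window_start) none ≠ [] ∨
       (data_start + 1 ≤ -(data.length : Int) - 1 ∧ (data.length : Int) + 1 ≤ window_size) ∨
       (2 ≤ (data.length : Int) ∧
        max (data_start + 1) (-(data.length : Int) - window_size) ≤
          min (-(data.length : Int) - 1) (-2 - window_size))))
instance (batch_size : Int) (data_start : Int) (window_start : Int) (window_size : Int) (data : List String) : Decidable (Pre_generate_batch_dynamic batch_size data_start window_start window_size data) := by unfold Pre_generate_batch_dynamic; infer_instance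

def pvWitness_generate_batch_dynamic : Int × Int × Int × Int × List String :=
  (3, 0, 0, 1, ["a", "b", "c"])

def Spec_generate_batch_dynamic (batch_size : Int) (data_start : Int) (window_start : Int) (window_size : Int) (data : List String) (out : List String × List String × (Int × Int)) : Prop := out = generate_batch_dynamic_alt batch_size data_start window_start window_size data
instance (batch_size : Int) (data_start : Int) (window_start : Int) (window_size : Int) (data : List String) (out : List String × List String × (Int × Int)) : Decidable (Spec_generate_batch_dynamic batch_size data_start window_start window_size data out) := by unfold Spec_generate_batch_dynamic; infer_instance

-- ===== CLAIM (what is proved, stated in full; the proofs are below) =====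
def Claim_equal_generate_batch_dynamic : Prop := ∀ (batch_size : Int) (data_start : Int) (window_start : Int) (window_size : Int) (data : List String), Dom_generate_batch_dynamic batch_size data_start window_start window_size data → Pre_generate_batch_dynamic batch_size data_start window_start window_size data → Spec_generate_batch_dynamic batch_size data_start window_start window_size data (generate_batch_dynamic batch_size data_start window_start window_size data)

-- ===== LEMMAS AND PROOFS =====

-- proof-side versions of B's two passes with the per-center offset made an explicit
-- argument (Source B computes it as 'window_start if i == data_start else 0'), and the
-- build step's empty-segment guard dropped (it is a no-op: replicate 0 = [])
def pvCntG (batch_size window_size n : Int) : Nat → Int → Int → Int → Option (Int × Int)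
  | 0, _, _, _ => none
  | f + 1, i, off, taken =>
    let L := pvWlenB window_size n i
    let m := L - pvClampB L off
    let r := max (batch_size - taken) 0
    if r < m then some (i, off + r)
    else pvCntG batch_size window_size n f (i + 1) 0 (taken + m)

def pvSegG (window_size : Int) (data : List String) (stop : Option (Int × Int)) (i off : Int) : List String :=
  match stop with
  | some s =>
    if i = s.1 then
      PySem.List.slice (PySem.List.slice (pvWind window_size data i) (some off) none) none (some (s.2 - off))
    else PySem.List.slice (pvWind window_size data i) (some off) none
  | none => PySem.List.slice (pvWind window_size data i) (some off) none

def pvBldG (window_size : Int) (data : List String) (stop : Option (Int × Int)) :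
    Nat → Int → Int → List String × List String
  | 0, _, _ => ([], [])
  | f + 1, i, off =>
    let seg := pvSegG window_size data stop i off
    let rest := pvBldG window_size data stop f (i + 1) 0
    (List.replicate seg.length ((PySem.List.pyGet? data i).getD "") ++ rest.1, seg ++ rest.2)

theorem pvClampB_eq (n : Nat) (k : Int) :
    pvClampB (n : Int) k = ((PySem.List.clampIdx n k : Nat) : Int) := by
  simp only [pvClampB, PySem.List.clampIdx]
  split_ifs <;> omega

theorem pvSegLen (xs : List String) (a : Int) :
    ((PySem.List.slice xs (some a) none).length : Int)
      = (xs.length : Int) - pvClampB (xs.length : Int) a := by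
  rw [PySem.List.slice_some_none, List.length_drop, pvClampB_eq]
  have := PySem.List.clampIdx_le xs.length a
  omega

theorem pvWlenB_eq (window_size : Int) (data : List String) (i : Int) :
    pvWlenB window_size (data.length : Int) i = ((pvWind window_size data i).length : Int) := by
  simp only [pvWind, List.length_append, PySem.List.length_slice, pvWlenB, pvSlenB, pvClampB_eq]
  have h1 := PySem.List.clampIdx_le data.length i
  have h2 := PySem.List.clampIdx_le data.length (max (i - window_size) 0)
  have h3 := PySem.List.clampIdx_le data.length (i + 1)
  have h4 := PySem.List.clampIdx_le data.length (min (i + window_size) (data.length : Int) + 1)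
  omega

-- characterisation of A's inner loop: it appends min(room, len) pairs, where
-- room = max(batch_size - len(train), 0), and early-returns iff room < len(els)
theorem pvInnerA_char (batch_size data_start : Int) (center : String) (els : List String) :
    ∀ (train labels : List String) (ws : Int),
    pvInnerA batch_size data_start center els train labels ws =
      (if max (batch_size - (train.length : Int)) 0 < (els.length : Int) then
        .inl (train ++ List.replicate (max (batch_size - (train.length : Int)) 0).toNat center,
              labels ++ els.take (max (batch_size - (train.length : Int)) 0).toNat,
              (data_start, ws + max (batch_size - (train.length : Int)) 0))
      else .inr (train ++ List.replicate els.length center, labels ++ els)) := by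
  induction els with
  | nil => intro train labels ws; simp [pvInnerA]
  | cons el rest ih =>
    intro train labels ws
    simp only [pvInnerA]
    by_cases h : (train.length : Int) < batch_size
    · rw [if_pos h, ih]
      have hr : max (batch_size - ((train ++ [center]).length : Int)) 0
          = max (batch_size - (train.length : Int)) 0 - 1 := by
        simp only [List.length_append, List.length_cons, List.length_nil]
        push_cast; omega
      by_cases h2 : max (batch_size - (train.length : Int)) 0 < ((el :: rest).length : Int)
      · rw [if_pos (by simp only [hr]; simp only [List.length_cons] at h2 ⊢; push_cast at h2 ⊢; omega),
          if_pos h2]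
        have hpos : 0 < max (batch_size - (train.length : Int)) 0 := by omega
        have htn : (max (batch_size - (train.length : Int)) 0 - 1).toNat + 1
            = (max (batch_size - (train.length : Int)) 0).toNat := by omega
        rw [hr, ← htn]
        simp only [List.replicate_succ, List.take_succ_cons, List.append_assoc,
          List.singleton_append, Sum.inl.injEq, Prod.mk.injEq]
        refine ⟨trivial, trivial, trivial, by omega⟩
      · rw [if_neg (by simp only [hr]; simp only [List.length_cons] at h2 ⊢; push_cast at h2 ⊢; omega),
          if_neg h2]
        simp only [List.length_cons, List.append_assoc, List.singleton_append,
          Sum.inr.injEq, Prod.mk.injEq]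
        exact ⟨by rw [← List.replicate_succ, List.replicate_succ'], trivial⟩
    · rw [if_neg h]
      have : max (batch_size - (train.length : Int)) 0 = 0 := by omega
      rw [if_pos (by rw [this]; simp only [List.length_cons]; push_cast; omega)]
      simp [this]

theorem pvCntG_ge (batch_size window_size n : Int) :
    ∀ (f : Nat) (i off taken : Int) (s : Int × Int),
    pvCntG batch_size window_size n f i off taken = some s → i ≤ s.1 := by
  intro f
  induction f with
  | zero => intro i off taken s h; simp [pvCntG] at h
  | succ f ih =>
    intro i off taken s h
    simp only [pvCntG] at h
    split_ifs at h with hc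
    · cases h; simp
    · have := ih (i + 1) 0 _ s h; omega

-- the main invariant: A's remaining outer loop equals count-then-build from the same state
theorem pvOuter_eq_cnt_bld (batch_size window_size : Int) (data : List String) :
    ∀ (f : Nat) (i off : Int) (train labels : List String), (f = 0 → off = 0) →
    pvOuterA batch_size window_size data f i off train labels =
      (match pvCntG batch_size window_size (data.length : Int) f i off (train.length : Int) with
       | some s =>
          (train ++ (pvBldG window_size data (some s) ((s.1 + 1 - i).toNat) i off).1,
           labels ++ (pvBldG window_size data (some s) ((s.1 + 1 - i).toNat) i off).2, s)
       | none =>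
          (train ++ (pvBldG window_size data none f i off).1,
           labels ++ (pvBldG window_size data none f i off).2, (i + (f : Int), 0))) := by
  intro f
  induction f with
  | zero =>
    intro i off train labels h0
    simp [pvOuterA, pvCntG, pvBldG, h0 rfl]
  | succ f ih =>
    intro i off train labels _
    simp only [pvOuterA]
    rw [pvInnerA_char]
    have hm : pvWlenB window_size (data.length : Int) i
          - pvClampB (pvWlenB window_size (data.length : Int) i) off
        = ((PySem.List.slice (pvWind window_size data i) (some off) none).length : Int) := by
      rw [pvSegLen, pvWlenB_eq]
    by_cases hc : max (batch_size - (train.length : Int)) 0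
        < ((PySem.List.slice (pvWind window_size data i) (some off) none).length : Int)
    · -- early return: the count finds the stop at this center
      rw [if_pos hc]
      have hcnt : pvCntG batch_size window_size (data.length : Int) (f + 1) i off (train.length : Int)
          = some (i, off + max (batch_size - (train.length : Int)) 0) := by
        simp only [pvCntG, hm]
        rw [if_pos hc]
      rw [hcnt]
      simp only
      have h1 : ((i + 1 - i).toNat) = 1 := by omega
      rw [h1]
      set r := max (batch_size - (train.length : Int)) 0 with hrdef
      have hr0 : 0 ≤ r := by omega
      set seg := PySem.List.slice (pvWind window_size data i) (some off) none with hseg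
      have hsegG : pvSegG window_size data (some (i, off + r)) i off = seg.take r.toNat := by
        have h2 : off + r - off = r := by ring
        simp only [pvSegG, ← hseg]
        rw [if_pos trivial, h2]
        exact PySem.List.slice_to seg hr0
      have hlen : (seg.take r.toNat).length = r.toNat := by
        rw [List.length_take]; omega
      simp only [pvBldG, hsegG, hlen, List.append_nil]
    · -- window consumed fully: recurse
      rw [if_neg hc]
      set seg := PySem.List.slice (pvWind window_size data i) (some off) none with hseg
      simp only
      rw [ih _ _ _ _ (fun _ => rfl)]
      have hcnt : pvCntG batch_size window_size (data.length : Int) (f + 1) i off (train.length : Int)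
          = pvCntG batch_size window_size (data.length : Int) f (i + 1) 0
              ((train.length : Int) + (seg.length : Int)) := by
        simp only [pvCntG, hm]
        rw [if_neg hc]
      have hlen' : (((train ++ List.replicate seg.length ((PySem.List.pyGet? data i).getD "")).length : Int))
          = (train.length : Int) + (seg.length : Int) := by
        simp
      rw [hcnt, hlen']
      cases hres : pvCntG batch_size window_size (data.length : Int) f (i + 1) 0
          ((train.length : Int) + (seg.length : Int)) with
      | some s =>
        simp only
        have hle : i + 1 ≤ s.1 := pvCntG_ge _ _ _ f (i + 1) 0 _ s hres
        have hfu : (s.1 + 1 - i).toNat = (s.1 + 1 - (i + 1)).toNat + 1 := by omega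
        have hsegG : pvSegG window_size data (some s) i off = seg := by
          simp only [pvSegG, ← hseg]
          rw [if_neg (by omega)]
        rw [hfu]
        simp only [pvBldG, hsegG]
        simp [List.append_assoc]
      | none =>
        simp only
        have hsegG : pvSegG window_size data none i off = seg := by
          simp only [pvSegG, ← hseg]
        have hia : i + 1 + (f : Int) = i + (((f + 1 : Nat) : Nat) : Int) := by push_cast; ring
        rw [hia]
        simp only [pvBldG, hsegG]
        simp [List.append_assoc]

-- bridge: the ported passes with the 'i == data_start' offset test equal the
-- explicit-offset versions, for i ≥ data_start
theorem pvCountB_eq_cntG (batch_size window_start window_size data_start n : Int) :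
    ∀ (f : Nat) (i taken : Int), data_start ≤ i →
    pvCountB batch_size window_start window_size data_start n f i taken
      = pvCntG batch_size window_size n f i (if i = data_start then window_start else 0) taken := by
  intro f
  induction f with
  | zero => intro i taken _; simp [pvCountB, pvCntG]
  | succ f ih =>
    intro i taken hle
    simp only [pvCountB, pvCntG]
    split_ifs
    all_goals first
      | rfl
      | rw [ih (i + 1) _ (by omega), if_neg (show ¬ (i + 1 = data_start) by omega)]

theorem pvBuildB_eq_bldG (window_start window_size data_start : Int) (data : List String)
    (stop : Option (Int × Int)) :
    ∀ (f : Nat) (i : Int), data_start ≤ i →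
    pvBuildB window_start window_size data_start data stop f i
      = pvBldG window_size data stop f i (if i = data_start then window_start else 0) := by
  intro f
  induction f with
  | zero => intro i _; simp [pvBuildB, pvBldG]
  | succ f ih =>
    intro i hle
    rcases stop with _ | s
    · simp only [pvBuildB, pvBldG, pvSegG]
      rw [ih (i + 1) (by omega), if_neg (show ¬ (i + 1 = data_start) by omega)]
      by_cases hz : PySem.List.slice (pvWind window_size data i)
          (some (if i = data_start then window_start else 0)) none = []
      · rw [if_pos hz, hz]; simp
      · rw [if_neg hz]
    · simp only [pvBuildB, pvBldG, pvSegG]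
      rw [ih (i + 1) (by omega), if_neg (show ¬ (i + 1 = data_start) by omega)]
      by_cases hz : (if i = s.1 then
            PySem.List.slice (PySem.List.slice (pvWind window_size data i)
              (some (if i = data_start then window_start else 0)) none) none
              (some (s.2 - (if i = data_start then window_start else 0)))
          else PySem.List.slice (pvWind window_size data i)
            (some (if i = data_start then window_start else 0)) none) = []
      · rw [if_pos hz, hz]; simp
      · rw [if_neg hz]

theorem generate_batch_dynamic_eq (batch_size data_start window_start window_size : Int)
    (data : List String) :
    generate_batch_dynamic batch_size data_start window_start window_size data =
      generate_batch_dynamic_alt batch_size data_start window_start window_size data := by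
  unfold generate_batch_dynamic generate_batch_dynamic_alt
  by_cases hge : (data.length : Int) ≤ data_start
  · rw [if_pos hge]
    have : (((data.length : Int) - data_start).toNat) = 0 := by omega
    rw [this]
    rfl
  · rw [if_neg hge]
    have hlt : data_start < (data.length : Int) := by omega
    rw [pvOuter_eq_cnt_bld batch_size window_size data _ data_start window_start [] []
      (by intro h; exfalso; omega)]
    rw [pvCountB_eq_cntG batch_size window_start window_size data_start (data.length : Int) _
      data_start 0 le_rfl, if_pos rfl]
    simp only [List.length_nil, Nat.cast_zero]
    cases hres : pvCntG batch_size window_size (data.length : Int)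
        (((data.length : Int) - data_start).toNat) data_start window_start 0 with
    | some s =>
      simp only
      rw [pvBuildB_eq_bldG window_start window_size data_start data (some s) _
        data_start le_rfl, if_pos rfl]
      simp
    | none =>
      simp only
      rw [pvBuildB_eq_bldG window_start window_size data_start data none _
        data_start le_rfl, if_pos rfl]
      have h1 : ((data.length : Int) - 1 + 1 - data_start).toNat
          = (((data.length : Int) - data_start).toNat) := by omega
      have h2 : data_start + ((((data.length : Int) - data_start).toNat : Nat) : Int)
          = (data.length : Int) := by omega
      rw [h1]
      simp
      omega

-- ===== VERDICT (by name: the statement is the Claim_ definition above) =====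
theorem generate_batch_dynamic_spec : Claim_equal_generate_batch_dynamic := by
  intro batch_size data_start window_start window_size data _ _
  exact generate_batch_dynamic_eq batch_size data_start window_start window_size data
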